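-- pv_equiv track=rewrite | github.com/dherath/MAGIC | maldefender/cfg_builder.py | addrInCodeSegment
-- ===== SOURCE A (Python) =====
-- def addrInCodeSegment(seg: str) -> str:
--     segNames = [
--         '.text:', 'CODE:', 'UPX1:', 'seg000:', 'qmoyiu:',
--         '.UfPOkc:', '.brick:', '.icode:', 'seg001:',
--         '.Much:', 'iuagwws:', '.idata:', '.edata:',
--         '.IqR:', '.data:', '.bss:', '.idata:', '.rsrc:',
--         '.tls:', '.reloc:', '.unpack:', '_1:', '.Upack:', '.mF:']
--     for prefix in segNames:
--         if seg.startswith(prefix) is True: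
--             colonIdx = seg.rfind(':')
--             if colonIdx != -1:
--                 return seg[colonIdx + 1:]
--             else:
--                 return seg[-8:]
--
--     return "NotInCodeSeg"
-- ===== SOURCE B (Python) =====
-- _SEG_BASES = frozenset({
--     '.text', 'CODE', 'UPX1', 'seg000', 'qmoyiu',
--     '.UfPOkc', '.brick', '.icode', 'seg001',
--     '.Much', 'iuagwws', '.idata', '.edata',
--     '.IqR', '.data', '.bss', '.rsrc',
--     '.tls', '.reloc', '.unpack', '_1', '.Upack', '.mF'})
--
--
-- def addrInCodeSegment(seg: str) -> str:
--     i = seg.find(':')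
--     if i == -1:
--         return "NotInCodeSeg"
--     if seg[:i] in _SEG_BASES:
--         return seg[seg.rfind(':') + 1:]
--     return "NotInCodeSeg"
-- ===== Notes on version B (the rewrite author's own statement) =====
-- stated objective: simpler
-- what changed: Replaces the linear scan of 24 startswith tests by one first-colon split and a single frozenset membership test on the segment name.
import Mathlib
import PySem

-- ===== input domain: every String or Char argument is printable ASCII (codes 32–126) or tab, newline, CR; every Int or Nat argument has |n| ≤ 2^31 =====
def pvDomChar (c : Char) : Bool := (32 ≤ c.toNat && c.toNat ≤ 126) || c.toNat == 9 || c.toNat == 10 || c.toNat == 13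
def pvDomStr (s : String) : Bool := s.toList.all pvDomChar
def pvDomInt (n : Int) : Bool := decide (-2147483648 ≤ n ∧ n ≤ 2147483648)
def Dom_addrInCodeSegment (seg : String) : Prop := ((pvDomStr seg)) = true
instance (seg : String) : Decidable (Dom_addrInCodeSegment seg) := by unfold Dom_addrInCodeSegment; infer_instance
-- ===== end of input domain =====

-- B replaces A's linear startswith scan by a first-colon split plus one set-membership test (objective: simpler).


-- ===== PORT A =====
def pvSegNames : List String := [
  ".text:", "CODE:", "UPX1:", "seg000:", "qmoyiu:",
  ".UfPOkc:", ".brick:", ".icode:", "seg001:",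
  ".Much:", "iuagwws:", ".idata:", ".edata:",
  ".IqR:", ".data:", ".bss:", ".idata:", ".rsrc:",
  ".tls:", ".reloc:", ".unpack:", "_1:", ".Upack:", ".mF:"]

def pvLoopA (ps : List String) (seg : String) : String :=
  match ps with
  | [] => "NotInCodeSeg"
  | p :: rest =>
    if PySem.Str.startswith seg p then
      let colonIdx := PySem.Str.rfind seg ":"
      if colonIdx ≠ -1 then PySem.Str.slice seg (some (colonIdx + 1)) none
      else PySem.Str.slice seg (some (-8)) none
    else pvLoopA rest seg

def addrInCodeSegment (seg : String) : String := pvLoopA pvSegNames seg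

-- ===== PORT B =====
def pvSegBases : PySem.Set String := PySem.Set.ofList [
  ".text", "CODE", "UPX1", "seg000", "qmoyiu",
  ".UfPOkc", ".brick", ".icode", "seg001",
  ".Much", "iuagwws", ".idata", ".edata",
  ".IqR", ".data", ".bss", ".rsrc",
  ".tls", ".reloc", ".unpack", "_1", ".Upack", ".mF"]

def addrInCodeSegment_alt (seg : String) : String :=
  let i := PySem.Str.find seg ":"
  if i = -1 then "NotInCodeSeg"
  else if PySem.Set.contains pvSegBases (PySem.Str.slice seg none (some i)) then
    PySem.Str.slice seg (some (PySem.Str.rfind seg ":" + 1)) none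
  else "NotInCodeSeg"

-- ===== PRECONDITION & SPEC =====
def Spec_addrInCodeSegment (seg : String) (out : String) : Prop := out = addrInCodeSegment_alt seg
instance (seg : String) (out : String) : Decidable (Spec_addrInCodeSegment seg out) := by unfold Spec_addrInCodeSegment; infer_instance

-- ===== CLAIM (what is proved, stated in full; the proofs are below) =====
def Claim_equal_addrInCodeSegment : Prop := ∀ (seg : String), Dom_addrInCodeSegment seg → Spec_addrInCodeSegment seg (addrInCodeSegment seg)

-- ===== LEMMAS AND PROOFS =====

-- the 24 prefix names of A with the trailing colon stripped (proof-side only)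
def pvBases24 : List String := [
  ".text", "CODE", "UPX1", "seg000", "qmoyiu",
  ".UfPOkc", ".brick", ".icode", "seg001",
  ".Much", "iuagwws", ".idata", ".edata",
  ".IqR", ".data", ".bss", ".idata", ".rsrc",
  ".tls", ".reloc", ".unpack", "_1", ".Upack", ".mF"]

theorem pv_rfind_go_ne (s sub : List Char) (n j : Nat) (hj : j ≤ n)
    (h : sub.isPrefixOf (s.drop j) = true) : PySem.Chars.rfind.go s sub n ≠ -1 := by
  induction n with
  | zero =>
    interval_cases j
    unfold PySem.Chars.rfind.go
    simp only [List.drop_zero] at h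
    simp [h]
  | succ m ih =>
    unfold PySem.Chars.rfind.go
    by_cases hc : sub.isPrefixOf (s.drop (m + 1)) = true
    · rw [if_pos hc]
      omega
    · simp only [hc, if_false, Bool.false_eq_true]
      rcases Nat.lt_or_ge j (m+1) with hlt | hge
      · exact ih (by omega)
      · have hj1 : j = m + 1 := by omega
        subst hj1
        exact absurd h hc

theorem pv_rfind_ne (seg : String) (h : 0 ≤ PySem.Str.find seg ":") :
    PySem.Str.rfind seg ":" ≠ -1 := by
  have hs := PySem.Chars.find_spec (s := seg.toList) (sub := (":").toList) (by simpa using h)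
  have hk : (PySem.Chars.find seg.toList (":").toList).toNat ≤ seg.toList.length := by
    have := PySem.Chars.find_le_length (s := seg.toList) (sub := (":").toList)
    omega
  simp only [PySem.Str.rfind_eq, PySem.Chars.rfind]
  exact pv_rfind_go_ne seg.toList (":").toList seg.toList.length _ hk
    (List.isPrefixOf_iff_prefix.mpr hs.1)

theorem pv_sw_iff (cs n : List Char) (hn : ':' ∉ n) :
    (n ++ [':']) <+: cs ↔
      0 ≤ PySem.Chars.find cs [':'] ∧ cs.take (PySem.Chars.find cs [':']).toNat = n := by
  constructor
  · intro h
    obtain ⟨t, ht⟩ := h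
    have hinf : [':'] <:+: cs := ⟨n, t, by simpa using ht⟩
    have h0 : 0 ≤ PySem.Chars.find cs [':'] := (PySem.Chars.find_nonneg_iff _ _).mpr hinf
    obtain ⟨hpre, hmin⟩ := PySem.Chars.find_spec (s := cs) (sub := [':']) h0
    set k := (PySem.Chars.find cs [':']).toNat with hkdef
    have hcs : cs = n ++ ':' :: t := by rw [← ht]; simp
    have hkn : k = n.length := by
      rcases Nat.lt_trichotomy k n.length with hlt | heq | hgt
      · exfalso
        obtain ⟨u, hu⟩ := hpre
        have hu' : cs.drop k = ':' :: u := by simpa using hu.symm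
        have hget : cs[k]? = some ':' := by
          have h2 : (cs.drop k)[0]? = some ':' := by rw [hu']; rfl
          rw [List.getElem?_drop] at h2
          simpa using h2
        have hgn : cs[k]? = n[k]? := by
          rw [hcs, List.getElem?_append_left hlt]
        rw [hgn] at hget
        exact hn (List.mem_of_getElem? hget)
      · exact heq
      · exfalso
        apply hmin n.length hgt
        rw [hcs]
        refine ⟨t, ?_⟩
        rw [List.drop_left]
        rfl
    exact ⟨h0, by rw [hkn, hcs]; simp⟩
  · rintro ⟨h0, ht⟩
    obtain ⟨hpre, -⟩ := PySem.Chars.find_spec (s := cs) (sub := [':']) h0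
    obtain ⟨u, hu⟩ := hpre
    refine ⟨u, ?_⟩
    conv_rhs => rw [← List.take_append_drop (PySem.Chars.find cs [':']).toNat cs]
    rw [ht, ← hu]
    simp

theorem pv_loop_eq (seg : String) (ns : List String)
    (hns : ∀ n ∈ ns, ':' ∉ n.toList) :
    pvLoopA (ns.map (· ++ ":")) seg =
      if 0 ≤ PySem.Str.find seg ":" ∧
          seg.toList.take (PySem.Str.find seg ":").toNat ∈ ns.map String.toList then
        (if PySem.Str.rfind seg ":" ≠ -1 then PySem.Str.slice seg (some (PySem.Str.rfind seg ":" + 1)) none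
         else PySem.Str.slice seg (some (-8)) none)
      else "NotInCodeSeg" := by
  induction ns with
  | nil => simp [pvLoopA]
  | cons n rest ih =>
    have hn : ':' ∉ n.toList := hns n (by simp)
    have hsw : PySem.Str.startswith seg (n ++ ":") = true ↔
        (n.toList ++ [':']) <+: seg.toList := by
      rw [PySem.Str.startswith_eq, PySem.Chars.startswith_iff]
      simp
    rw [List.map_cons, pvLoopA]
    by_cases h : PySem.Str.startswith seg (n ++ ":") = true
    · have hiff := (pv_sw_iff seg.toList n.toList hn).mp (hsw.mp h)
      have hfull : 0 ≤ PySem.Str.find seg ":" ∧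
          seg.toList.take (PySem.Str.find seg ":").toNat ∈ (n :: rest).map String.toList :=
        ⟨by simpa using hiff.1,
         by simp only [List.map_cons, List.mem_cons]; left; simpa using hiff.2⟩
      rw [if_pos h, if_pos hfull]
    · rw [if_neg h, ih (fun m hm => hns m (by simp [hm]))]
      refine if_congr ⟨?_, ?_⟩ rfl rfl
      · rintro ⟨h0, hmem⟩
        exact ⟨h0, by simp only [List.map_cons, List.mem_cons]; right; exact hmem⟩
      · rintro ⟨h0, hmem⟩
        simp only [List.map_cons, List.mem_cons] at hmem
        rcases hmem with heq | hmem
        · exact absurd (hsw.mpr ((pv_sw_iff seg.toList n.toList hn).mpr ⟨by simpa using h0, heq⟩)) h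
        · exact ⟨h0, hmem⟩

theorem pv_mem_map_toList (x : String) (l : List String) :
    x.toList ∈ l.map String.toList ↔ x ∈ l := by
  simp only [List.mem_map]
  constructor
  · rintro ⟨a, ha, hax⟩
    rwa [String.toList_inj.mp hax] at ha
  · intro hx
    exact ⟨x, hx, rfl⟩

set_option maxHeartbeats 1000000 in
theorem pv_mem24 (x : String) : x ∈ pvBases24 ↔ PySem.Set.contains pvSegBases x = true := by
  have hset : pvSegBases = [
    ".text", "CODE", "UPX1", "seg000", "qmoyiu",
    ".UfPOkc", ".brick", ".icode", "seg001",
    ".Much", "iuagwws", ".idata", ".edata",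
    ".IqR", ".data", ".bss", ".rsrc",
    ".tls", ".reloc", ".unpack", "_1", ".Upack", ".mF"] := by decide
  simp only [pvBases24, hset, PySem.Set.contains, List.contains_iff_mem, List.mem_cons,
    List.not_mem_nil, or_false]
  tauto

-- ===== VERDICT (by name: the statement is the Claim_ definition above) =====
theorem addrInCodeSegment_spec : Claim_equal_addrInCodeSegment := by
  intro seg _
  unfold Spec_addrInCodeSegment addrInCodeSegment addrInCodeSegment_alt
  rw [show pvSegNames = pvBases24.map (· ++ ":") from by decide,
      pv_loop_eq seg _ (by decide)]
  simp only []
  by_cases h0 : 0 ≤ PySem.Str.find seg ":"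
  · have hne : ¬ PySem.Str.find seg ":" = -1 := by omega
    have hrf := pv_rfind_ne seg h0
    have htok : (PySem.Str.slice seg none (some (PySem.Str.find seg ":"))).toList =
        seg.toList.take (PySem.Str.find seg ":").toNat := by
      have h0' : 0 ≤ PySem.Chars.find seg.toList [':'] := by simpa using h0
      simp [PySem.List.slice_to _ h0']
    have hmem : seg.toList.take (PySem.Str.find seg ":").toNat ∈ pvBases24.map String.toList ↔
        PySem.Set.contains pvSegBases (PySem.Str.slice seg none (some (PySem.Str.find seg ":"))) = true := by
      rw [← htok, pv_mem_map_toList, pv_mem24]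
    rw [if_neg hne]
    by_cases hm : PySem.Set.contains pvSegBases
        (PySem.Str.slice seg none (some (PySem.Str.find seg ":"))) = true
    · rw [if_pos ⟨h0, hmem.mpr hm⟩, if_pos hrf, if_pos hm]
    · rw [if_neg (fun hc => hm (hmem.mp hc.2)), if_neg hm]
  · have hm1 : PySem.Str.find seg ":" = -1 := by
      have := PySem.Chars.neg_one_le_find (s := seg.toList) (sub := (":").toList)
      simp only [PySem.Str.find_eq] at *
      omega
    rw [if_pos hm1, if_neg (fun hc => h0 hc.1)]
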